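-- pv_equiv track=rewrite | github.com/3123738092/arxiv-research-agent | skills/data_collector/scripts/fetch_arxiv.py | filter_by_negative_keywords
-- ===== SOURCE A (Python) =====
-- def filter_by_negative_keywords(papers, negative_keywords):
--     """Remove papers whose title+abstract contain any negative keyword (case-insensitive)."""
--     if not negative_keywords:
--         return papers
--     lowered_neg = [k.lower() for k in negative_keywords]
--     kept = []
--     for p in papers:
--         text = (p["title"] + " " + p["abstract"]).lower()
--         if not any(k in text for k in lowered_neg):
--             kept.append(p)
--     return kept
-- ===== SOURCE B (Python) =====
-- def filter_by_negative_keywords(papers, negative_keywords):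
--     """Remove papers whose title+abstract contain any negative keyword (case-insensitive).
--
--     Keyword-major: successively narrow the list, one filtering pass per keyword."""
--     kept = list(papers)
--     for k in negative_keywords:
--         k = k.lower()
--         kept = [p for p in kept
--                 if k not in (p["title"] + " " + p["abstract"]).lower()]
--     return kept
-- ===== Notes on version B (the rewrite author's own statement) =====
-- stated objective: simpler
-- what changed: Keyword-major staged filtering: one filtering pass over the (shrinking) paper list per keyword, instead of A's single paper-major pass with an inner any-over-keywords loop and an explicit kept accumulator; Pre_ excludes only inputs where A raises KeyError (a paper missing 'title' or 'abstract' while keywords are non-empty).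
import Mathlib
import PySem

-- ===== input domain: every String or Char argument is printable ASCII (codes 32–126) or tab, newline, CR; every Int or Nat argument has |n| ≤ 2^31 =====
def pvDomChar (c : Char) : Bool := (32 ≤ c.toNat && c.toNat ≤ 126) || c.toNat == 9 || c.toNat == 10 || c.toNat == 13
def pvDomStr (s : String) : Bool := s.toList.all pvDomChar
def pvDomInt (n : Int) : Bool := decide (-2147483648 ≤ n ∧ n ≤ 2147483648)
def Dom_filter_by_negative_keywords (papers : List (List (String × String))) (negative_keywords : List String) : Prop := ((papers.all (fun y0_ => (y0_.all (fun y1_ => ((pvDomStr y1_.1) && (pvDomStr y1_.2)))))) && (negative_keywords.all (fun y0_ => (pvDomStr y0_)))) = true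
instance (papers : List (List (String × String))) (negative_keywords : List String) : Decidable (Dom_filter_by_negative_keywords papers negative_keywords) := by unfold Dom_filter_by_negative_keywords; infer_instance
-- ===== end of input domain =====

-- B replaces A's paper-major pass (explicit kept accumulator, inner any over keywords)
-- with keyword-major staged filtering: one filter pass over the shrinking list per
-- keyword (simpler decomposition; return value proved equal on Pre_).


-- ===== PORT A =====
-- p["title"]: dict lookup = first matching key of the association list; Pre_ guarantees
-- the key is present, so the ".getD """ default is never reached inside Pre_.
def pvField (p : List (String × String)) (k : String) : String :=
  (List.lookup k p).getD ""

-- text = (p["title"] + " " + p["abstract"]).lower(), as a list of code points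
-- (both Pythons build the text by this same expression, so the helper is shared)
def pvText (p : List (String × String)) : List Char :=
  PySem.Chars.lower ((pvField p "title").toList ++ ' ' :: (pvField p "abstract").toList)

def filter_by_negative_keywords (papers : List (List (String × String))) (negative_keywords : List String) : List (List (String × String)) :=
  if negative_keywords = [] then papers
  else
    let lowered_neg := negative_keywords.map (fun k => PySem.Chars.lower k.toList)
    papers.foldl (fun kept p =>
      let text := pvText p
      if lowered_neg.any (fun k => PySem.Chars.isIn k text) then kept
      else kept ++ [p]) []

-- ===== PORT B =====
-- 'kept = list(papers); for k in negative_keywords: kept = [p for p in kept if …]'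
-- is a fold of filtering passes over the keyword list, starting from papers.
def filter_by_negative_keywords_alt (papers : List (List (String × String))) (negative_keywords : List String) : List (List (String × String)) :=
  negative_keywords.foldl (fun kept k =>
    kept.filter (fun p => !PySem.Chars.isIn (PySem.Chars.lower k.toList) (pvText p))) papers

-- ===== PRECONDITION & SPEC =====
-- Pre_ excludes exactly the inputs where the Python A raises KeyError: a paper without
-- a "title" or "abstract" key while negative_keywords is non-empty.
def Pre_filter_by_negative_keywords (papers : List (List (String × String))) (negative_keywords : List String) : Prop :=
  negative_keywords = [] ∨
    ∀ p ∈ papers, (List.lookup "title" p).isSome ∧ (List.lookup "abstract" p).isSome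
instance (papers : List (List (String × String))) (negative_keywords : List String) : Decidable (Pre_filter_by_negative_keywords papers negative_keywords) := by unfold Pre_filter_by_negative_keywords; infer_instance

def pvWitness_filter_by_negative_keywords : (List (List (String × String))) × List String :=
  ([[("title", "Deep nets"), ("abstract", "a survey")]], ["quantum"])

def Spec_filter_by_negative_keywords (papers : List (List (String × String))) (negative_keywords : List String) (out : List (List (String × String))) : Prop := out = filter_by_negative_keywords_alt papers negative_keywords
instance (papers : List (List (String × String))) (negative_keywords : List String) (out : List (List (String × String))) : Decidable (Spec_filter_by_negative_keywords papers negative_keywords out) := by unfold Spec_filter_by_negative_keywords; infer_instance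

-- ===== CLAIM (what is proved, stated in full; the proofs are below) =====
def Claim_equal_filter_by_negative_keywords : Prop := ∀ (papers : List (List (String × String))) (negative_keywords : List String), Dom_filter_by_negative_keywords papers negative_keywords → Pre_filter_by_negative_keywords papers negative_keywords → Spec_filter_by_negative_keywords papers negative_keywords (filter_by_negative_keywords papers negative_keywords)

-- ===== LEMMAS AND PROOFS =====

-- staged filtering = one filter by the conjunction of all the per-keyword tests
theorem pv_stages_eq (neg : List String) (papers : List (List (String × String))) :
    neg.foldl (fun kept k =>
        kept.filter (fun p => !PySem.Chars.isIn (PySem.Chars.lower k.toList) (pvText p))) papers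
      = papers.filter (fun p =>
          neg.all (fun k => !PySem.Chars.isIn (PySem.Chars.lower k.toList) (pvText p))) := by
  induction neg generalizing papers with
  | nil => simp
  | cons k ks ih =>
      simp only [List.foldl_cons, ih, List.filter_filter, List.all_cons]
      congr 1
      funext p
      rw [Bool.and_comm]

-- ===== VERDICT (by name: the statement is the Claim_ definition above) =====
theorem filter_by_negative_keywords_spec : Claim_equal_filter_by_negative_keywords := by
  intro papers negative_keywords _ _
  unfold Spec_filter_by_negative_keywords filter_by_negative_keywords filter_by_negative_keywords_alt
  rw [pv_stages_eq]
  by_cases hnk : negative_keywords = []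
  · simp [hnk]
  · simp only [hnk, if_false]
    have hstep : ∀ (kept : List (List (String × String))) (p : List (String × String)),
        (if (negative_keywords.map (fun k => PySem.Chars.lower k.toList)).any
              (fun k => PySem.Chars.isIn k (pvText p)) then kept else kept ++ [p])
        = (if (negative_keywords.all
              (fun k => !PySem.Chars.isIn (PySem.Chars.lower k.toList) (pvText p))) then kept ++ [p] else kept) := by
      intro kept p
      have : (negative_keywords.map (fun k => PySem.Chars.lower k.toList)).any
              (fun k => PySem.Chars.isIn k (pvText p))
           = !(negative_keywords.all
              (fun k => !PySem.Chars.isIn (PySem.Chars.lower k.toList) (pvText p))) := by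
        simp [List.any_map, Function.comp_def, List.all_eq_not_any_not]
      rw [this]
      cases negative_keywords.all
          (fun k => !PySem.Chars.isIn (PySem.Chars.lower k.toList) (pvText p)) <;> simp
    rw [show (fun (kept : List (List (String × String))) p =>
          if (negative_keywords.map (fun k => PySem.Chars.lower k.toList)).any
              (fun k => PySem.Chars.isIn k (pvText p)) then kept else kept ++ [p])
        = (fun kept p =>
          if (negative_keywords.all
              (fun k => !PySem.Chars.isIn (PySem.Chars.lower k.toList) (pvText p))) then kept ++ [p] else kept)
        from funext fun kept => funext fun p => hstep kept p]
    simpa using PySem.List.foldl_append_if_eq_filter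
      (fun p => negative_keywords.all
        (fun k => !PySem.Chars.isIn (PySem.Chars.lower k.toList) (pvText p))) papers []
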